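-- pv_equiv track=rewrite | github.com/bschwant/ElementsOfAI | bschwant-a0/arrange_pichus.py | check_row
-- ===== SOURCE A (Python) =====
-- def check_row(house_map,r,c):
--
--     pichu = False
--     wall = False
--
--     row_len = len(house_map)
--     temp_row = []
--
--     # Add row to temp list
--     for i in range(0, row_len):
--         if i == r:
--             temp_row.append('p')
--         else:
--             temp_row.append(house_map[i][c])
--
--     # Check row for repeat pichus
--     for i in range(0, row_len):
--         if temp_row[i] == 'p':
--             # Check for previous pichu
--             if pichu == True:
--                 return False
--             else:
--                 pichu = True
--         elif temp_row[i] == 'X':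
--             pichu = False
--             wall = True
--     return True
-- ===== SOURCE B (Python) =====
-- def check_row(house_map, r, c):
--     col = ''.join('p' if i == r else row[c] for i, row in enumerate(house_map))
--     return all(seg.count('p') <= 1 for seg in col.split('X'))
-- ===== Notes on version B (the rewrite author's own statement) =====
-- stated objective: simpler
-- what changed: Replaces the temp-list build plus running-boolean scan with early return by joining the column into one string, splitting it on wall characters 'X', and checking every wall-delimited segment contains at most one 'p'.
import Mathlib
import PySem

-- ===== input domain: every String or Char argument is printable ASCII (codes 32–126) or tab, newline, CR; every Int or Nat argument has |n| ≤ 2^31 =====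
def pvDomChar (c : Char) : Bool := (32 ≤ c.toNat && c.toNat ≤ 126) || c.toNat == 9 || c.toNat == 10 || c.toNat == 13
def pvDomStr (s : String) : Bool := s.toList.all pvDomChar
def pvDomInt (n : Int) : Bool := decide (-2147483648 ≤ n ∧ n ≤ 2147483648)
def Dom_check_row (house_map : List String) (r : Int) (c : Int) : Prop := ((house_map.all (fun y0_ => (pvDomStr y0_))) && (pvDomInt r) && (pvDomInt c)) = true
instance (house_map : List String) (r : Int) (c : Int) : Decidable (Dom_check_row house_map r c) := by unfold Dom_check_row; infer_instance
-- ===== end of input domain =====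

-- B replaces A's temp-list + running-boolean scan (with early return) by a split-on-walls /
-- count-per-segment decomposition: simpler, same O(n) cost.


-- ===== PORT A =====
-- Cells are Option Char: 'house_map[i][c]' is PySem pyGet?, none = IndexError (excluded by Pre_).
-- The second 'for' loop with its early return, as structural recursion over (pichu, wall).
def check_row_loop : List (Option Char) → Bool → Bool → Bool
  | [], _, _ => true
  | x :: xs, pichu, wall =>
    if x == some 'p' then
      (if pichu then false else check_row_loop xs true wall)
    else if x == some 'X' then check_row_loop xs false true
    else check_row_loop xs pichu wall

def check_row (house_map : List String) (r : Int) (c : Int) : Bool :=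
  let row_len := house_map.length
  let temp_row : List (Option Char) :=
    (PySem.List.pyRange 0 row_len 1).foldl
      (fun acc i =>
        acc ++ [if i = r then some 'p'
                else (PySem.List.pyGet? house_map i).bind (fun row => PySem.Str.pyGet? row c)]) []
  check_row_loop temp_row false false

-- ===== PORT B =====
-- col = ''.join('p' if i == r else row[c] for i, row in enumerate(house_map));
-- all(seg.count('p') <= 1 for seg in col.split('X')); str.split/str.count ported as
-- List.splitOn / List.count on the column's cells (Option Char, none = IndexError, excluded by Pre_).
def check_row_alt (house_map : List String) (r : Int) (c : Int) : Bool :=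
  let col : List (Option Char) :=
    (PySem.List.enumerate house_map 0).map
      (fun p => if p.1 = r then some 'p' else PySem.Str.pyGet? p.2 c)
  (col.splitOn (some 'X')).all (fun seg => decide (seg.count (some 'p') ≤ 1))

-- ===== PRECONDITION & SPEC =====
-- Pre_ excludes exactly the inputs where Python A raises IndexError: a row other than row r
-- whose length does not admit index c (Python negative indexing included).
def Pre_check_row (house_map : List String) (r : Int) (c : Int) : Prop :=
  ∀ p ∈ PySem.List.enumerate house_map 0, p.1 ≠ r → PySem.Raise.InRange p.2.length c
instance (house_map : List String) (r : Int) (c : Int) : Decidable (Pre_check_row house_map r c) := by unfold Pre_check_row; infer_instance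
def pvWitness_check_row : List String × Int × Int := (["p.", ".X"], 0, 1)

def Spec_check_row (house_map : List String) (r : Int) (c : Int) (out : Bool) : Prop := out = check_row_alt house_map r c
instance (house_map : List String) (r : Int) (c : Int) (out : Bool) : Decidable (Spec_check_row house_map r c out) := by unfold Spec_check_row; infer_instance

-- ===== CLAIM (what is proved, stated in full; the proofs are below) =====
def Claim_equal_check_row : Prop := ∀ (house_map : List String) (r : Int) (c : Int), Dom_check_row house_map r c → Pre_check_row house_map r c → Spec_check_row house_map r c (check_row house_map r c)

-- ===== LEMMAS AND PROOFS =====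

-- The two column lists are equal.
theorem col_eq (house_map : List String) (r : Int) (c : Int) :
    ((PySem.List.pyRange 0 house_map.length 1).foldl
      (fun (acc : List (Option Char)) i =>
        acc ++ [if i = r then some 'p'
                else (PySem.List.pyGet? house_map i).bind (fun row => PySem.Str.pyGet? row c)]) [])
    = (PySem.List.enumerate house_map 0).map
        (fun p => if p.1 = r then some 'p' else PySem.Str.pyGet? p.2 c) := by
  rw [PySem.List.foldl_append_singleton_eq_map, List.nil_append,
      PySem.List.enumerate_eq_map_pyRange (d := ""), List.map_map]
  refine List.map_congr_left ?_
  intro i hi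
  rw [PySem.List.mem_pyRange_one] at hi
  by_cases h : i = r
  · simp [h]
  · simp only [Function.comp_apply, if_neg h]
    have h0 : (0:Int) ≤ i := hi.1
    have hlt : i.toNat < house_map.length := by omega
    rw [PySem.List.pyGet?_of_nonneg house_map h0, List.getElem?_eq_getElem hlt, Option.bind_some]
    congr 1
    have hcast : i = ((i.toNat : Nat) : Int) := by omega
    have h2 : PySem.List.pyGetD house_map i "" = house_map.getD i.toNat "" := by
      conv_lhs => rw [hcast]
      rw [PySem.List.pyGetD_natCast]
    rw [h2, List.getD_eq_getElem?_getD, List.getElem?_eq_getElem hlt]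
    rfl

-- A's scan with reset equals B's per-segment bound, generalized over the running state.
theorem loop_eq (l : List (Option Char)) (pichu wall : Bool) :
    check_row_loop l pichu wall =
      (decide ((l.splitOn (some 'X')).headI.count (some 'p') ≤ (if pichu then 0 else 1)) &&
       (l.splitOn (some 'X')).tail.all (fun seg => decide (seg.count (some 'p') ≤ 1))) := by
  induction l generalizing pichu wall with
  | nil => cases pichu <;> simp [check_row_loop, List.splitOn, List.splitOnP_nil]
  | cons x xs ih =>
    obtain ⟨s, t, hst⟩ := List.exists_cons_of_ne_nil
      (List.splitOnP_ne_nil (fun y => y == some 'X') xs)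
    by_cases hp : x = some 'p'
    · subst hp
      have hsp : ((some 'p' : Option Char) :: xs).splitOn (some 'X')
          = (s.cons (some 'p')) :: t := by
        simp [List.splitOn, List.splitOnP_cons, hst]
      cases pichu with
      | true =>
        simp [check_row_loop, hsp]
      | false =>
        have := ih true wall
        simp only [List.splitOn, hst] at this
        simp [check_row_loop, hsp, this]
    · by_cases hx : x = some 'X'
      · subst hx
        have hsp : ((some 'X' : Option Char) :: xs).splitOn (some 'X')
            = [] :: xs.splitOn (some 'X') := by
          simp [List.splitOn, List.splitOnP_cons]
        have := ih false true
        simp only [List.splitOn, hst] at this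
        simp [check_row_loop, this, List.splitOn, hst]
      · have hsp : (x :: xs).splitOn (some 'X') = (s.cons x) :: t := by
          simp [List.splitOn, List.splitOnP_cons, hx, hst]
        have := ih pichu wall
        simp only [List.splitOn, hst] at this
        simp only [check_row_loop, beq_iff_eq, hp, hx, if_false, this, hsp]
        simp [hp]
        rfl

-- all over splitOn = head condition && tail condition
theorem all_splitOn (l : List (Option Char)) :
    (l.splitOn (some 'X')).all (fun seg => decide (seg.count (some 'p') ≤ 1)) =
      (decide ((l.splitOn (some 'X')).headI.count (some 'p') ≤ 1) &&
       (l.splitOn (some 'X')).tail.all (fun seg => decide (seg.count (some 'p') ≤ 1))) := by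
  obtain ⟨s, t, hst⟩ := List.exists_cons_of_ne_nil
    (List.splitOnP_ne_nil (fun y => y == some 'X') l)
  simp [List.splitOn, hst]

-- ===== VERDICT (by name: the statement is the Claim_ definition above) =====
theorem check_row_spec : Claim_equal_check_row := by
  intro house_map r c _ _
  unfold Spec_check_row check_row check_row_alt
  dsimp only
  rw [col_eq, loop_eq, all_splitOn]
  simp
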